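-- pv_equiv track=rewrite | github.com/danhyoyo/Codeforce | 2065C2.py | giai
-- ===== SOURCE A (Python) =====
-- def giai(n,l,m,l1):
--     l[0] = min(min(l1)-l[0],l[0])
--     if(sorted(l)==l): return "YES"
--     for i in range(1, len(l)):
--         o = l[i]
--         for j in range(len(l1)):
--             k = l[i]+1
--             if (l1[j]-l[i]>=l[i-1]):
--                 k = l1[j]-l[i]
--             if k < o: o = k
--         l[i] = o
--         if(sorted(l)==l): return "YES"
--     return "NO"
-- ===== SOURCE B (Python) =====
-- def _lower_bound(s, t):
--     # CPython's bisect_left loop, hand-written (A imports nothing, so no bisect)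
--     lo, hi = 0, len(s)
--     while lo < hi:
--         mid = (lo + hi) // 2
--         if s[mid] < t:
--             lo = mid + 1
--         else:
--             hi = mid
--     return lo
--
-- def giai(n, l, m, l1):
--     s = sorted(l1)
--     out = [min(s[0] - l[0], l[0])]
--     for x in l[1:]:
--         prev = out[-1]
--         i = _lower_bound(s, prev + x)
--         y = min(x, s[i] - x) if i < len(s) else x
--         out.append(y)
--     return "YES" if all(a <= b for a, b in zip(out, out[1:])) else "NO"
-- ===== Notes on version B (the rewrite author's own statement) =====
-- stated objective: faster
-- what changed: B sorts l1 once and finds each element's best replacement by binary search (a hand-written bisect_left) instead of A's linear scan of l1 per element, and checks non-decreasingness once at the end instead of A's sort-and-compare of the whole list after every single step.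
import Mathlib
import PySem

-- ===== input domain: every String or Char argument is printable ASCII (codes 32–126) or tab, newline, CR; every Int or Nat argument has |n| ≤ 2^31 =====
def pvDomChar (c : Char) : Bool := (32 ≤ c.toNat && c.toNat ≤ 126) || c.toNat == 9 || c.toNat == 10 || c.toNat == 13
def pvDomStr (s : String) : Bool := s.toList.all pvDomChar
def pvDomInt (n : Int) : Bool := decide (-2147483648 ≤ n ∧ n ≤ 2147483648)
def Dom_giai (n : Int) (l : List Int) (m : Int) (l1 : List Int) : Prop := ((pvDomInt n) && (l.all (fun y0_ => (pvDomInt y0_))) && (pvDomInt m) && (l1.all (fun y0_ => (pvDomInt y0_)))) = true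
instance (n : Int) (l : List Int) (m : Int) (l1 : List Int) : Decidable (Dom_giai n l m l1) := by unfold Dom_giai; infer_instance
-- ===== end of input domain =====

-- B replaces A's per-element linear scan of l1 and per-step re-sort-and-compare check by one sort
-- of l1 plus a binary search per element and a single final non-decreasing check (objective: faster).
-- A mutates its argument l in place; B does not — the equivalence proved here is about the return value only.

-- ===== PORT A =====
-- inner 'for j in range(len(l1))' loop of A: o starts at l[i], k = l1[j]-l[i] if it qualifies else l[i]+1
def giaiInner (l1 : List Int) (prev x : Int) : Int :=
  l1.foldl (fun o v =>
    let k := if prev ≤ v - x then v - x else x + 1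
    if k < o then k else o) x

-- 'for i in range(1, len(l))' with early 'return "YES"'; l[i] = o via List.set
-- (indices i, i-1 are in range whenever reached, so getD's default is never read)
def giaiLoop (l1 : List Int) (lst : List Int) (i : Nat) : String :=
  if h : i < lst.length then
    let o := giaiInner l1 (lst.getD (i-1) 0) (lst.getD i 0)
    let lst' := lst.set i o
    if PySem.List.sorted lst' (fun y => y) = lst' then "YES"
    else giaiLoop l1 lst' (i+1)
  else "NO"
termination_by lst.length - i
decreasing_by simp only [List.length_set]; omega

-- l[0] and min(l1) raise on empty l / l1; those inputs are outside Pre_giai (the getD defaults are never read inside Pre_)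
def giai (n : Int) (l : List Int) (m : Int) (l1 : List Int) : String :=
  let a0 := min (((PySem.List.min? l1 (fun y => y)).getD 0) - l.getD 0 0) (l.getD 0 0)
  let lst := l.set 0 a0
  if PySem.List.sorted lst (fun y => y) = lst then "YES" else giaiLoop l1 lst 1

-- ===== PORT B =====
-- Source B's _lower_bound is literally CPython's bisect_left loop, ported as PySem.List.bisectLeft;
-- the loop body 'prev = out[-1]; i = _lower_bound(s, prev+x); y = ...' is altStep
def altStep (s : List Int) (prev x : Int) : Int :=
  let i := PySem.List.bisectLeft s (prev + x)
  if i < s.length then min x (s.getD i 0 - x) else x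

def giai_alt (n : Int) (l : List Int) (m : Int) (l1 : List Int) : String :=
  let s := PySem.List.sorted l1 (fun y => y)
  let out := (l.drop 1).foldl
    (fun out x => out ++ [altStep s (out.getLastD 0) x])
    [min (s.getD 0 0 - l.getD 0 0) (l.getD 0 0)]
  if (out.zip (out.drop 1)).all (fun p => decide (p.1 ≤ p.2)) then "YES" else "NO"

-- ===== PRECONDITION & SPEC =====
-- Pre_ excludes exactly the raising inputs: empty l (IndexError on l[0]) and empty l1 (ValueError on min(l1))
def Pre_giai (n : Int) (l : List Int) (m : Int) (l1 : List Int) : Prop := l ≠ [] ∧ l1 ≠ []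
instance (n : Int) (l : List Int) (m : Int) (l1 : List Int) : Decidable (Pre_giai n l m l1) := by unfold Pre_giai; infer_instance
def pvWitness_giai : Int × List Int × Int × List Int := (3, [5, 2, 4], 2, [6, 9])

def Spec_giai (n : Int) (l : List Int) (m : Int) (l1 : List Int) (out : String) : Prop := out = giai_alt n l m l1
instance (n : Int) (l : List Int) (m : Int) (l1 : List Int) (out : String) : Decidable (Spec_giai n l m l1 out) := by unfold Spec_giai; infer_instance

-- ===== CLAIM (what is proved, stated in full; the proofs are below) =====
def Claim_equal_giai : Prop := ∀ (n : Int) (l : List Int) (m : Int) (l1 : List Int), Dom_giai n l m l1 → Pre_giai n l m l1 → Spec_giai n l m l1 (giai n l m l1)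

-- ===== LEMMAS AND PROOFS =====

-- B's pass as a pure recursion: the values B appends after the first element
def runAlt (s : List Int) (prev : Int) : List Int → List Int
  | [] => []
  | x :: xs => altStep s prev x :: runAlt s (altStep s prev x) xs

-- the qualifying candidates v - x, for v ∈ t with prev ≤ v - x
def cands (prev x : Int) (t : List Int) : List Int :=
  (t.filter (fun v => decide (prev ≤ v - x))).map (fun v => v - x)

theorem inner_fold (prev x : Int) (t : List Int) : ∀ (o : Int), o ≤ x + 1 →
    t.foldl (fun o v =>
      let k := if prev ≤ v - x then v - x else x + 1
      if k < o then k else o) o = (cands prev x t).foldl min o := by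
  induction t with
  | nil => intro o _; simp [cands]
  | cons v t ih =>
    intro o ho
    simp only [List.foldl_cons, cands, List.filter_cons]
    by_cases hq : prev ≤ v - x
    · simp only [hq, decide_true, if_pos, List.map_cons, List.foldl_cons]
      have : (if (v - x) < o then (v - x) else o) = min o (v - x) := by
        simp [min_def]; omega
      rw [this]
      have := ih (min o (v - x)) (by omega)
      simpa [cands] using this
    · simp only [hq, decide_false, if_neg, Bool.false_eq_true, not_false_eq_true]
      have h1 : (if (x + 1) < o then (x + 1) else o) = o := by omega
      rw [h1]
      simpa [cands] using ih o ho

theorem giaiInner_eq_foldl_min (l1 : List Int) (prev x : Int) :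
    giaiInner l1 prev x = (cands prev x l1).foldl min x :=
  inner_fold prev x l1 x (by omega)

theorem foldl_min_eq_min (cs : List Int) (x m : Int) (hm : m ∈ cs) (hmin : ∀ c ∈ cs, m ≤ c) :
    cs.foldl min x = min x m := by
  apply le_antisymm
  · exact le_min (PySem.List.foldl_min_le cs x).1 ((PySem.List.foldl_min_le cs x).2 m hm)
  · rcases PySem.List.foldl_min_mem cs x with h | h
    · rw [h]; exact min_le_left _ _
    · exact le_trans (min_le_right x m) (hmin _ h)

theorem cands_perm (prev x : Int) {t u : List Int} (h : t.Perm u) :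
    (cands prev x t).Perm (cands prev x u) :=
  List.Perm.map _ (List.Perm.filter _ h)

theorem altStep_eq_foldl_min (l1 : List Int) (prev x : Int) :
    altStep (PySem.List.sorted l1 (fun y => y)) prev x = (cands prev x l1).foldl min x := by
  set s := PySem.List.sorted l1 (fun y => y) with hs
  have hperm : (cands prev x l1).foldl min x = (cands prev x s).foldl min x :=
    List.Perm.foldl_eq (cands_perm prev x (List.Perm.symm (PySem.List.sorted_perm l1 (fun y => y) false))) x
  rw [hperm]
  have hpw : List.Pairwise (fun a b => a ≤ b) s := PySem.List.sorted_pairwise l1 (fun y => y)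
  obtain ⟨hle, hlt, hge⟩ := PySem.List.bisectLeft_spec s (prev + x) hpw
  unfold altStep
  simp only []
  by_cases hi : PySem.List.bisectLeft s (prev + x) < s.length
  · rw [if_pos hi]
    set i := PySem.List.bisectLeft s (prev + x) with hidef
    have hgd : s.getD i 0 = s[i] := List.getD_eq_getElem s 0 hi
    rw [hgd]
    rw [foldl_min_eq_min (cands prev x s) x (s[i] - x) ?_ ?_]
    · unfold cands
      apply List.mem_map.mpr
      refine ⟨s[i], ?_, rfl⟩
      apply List.mem_filter.mpr
      refine ⟨List.getElem_mem hi, ?_⟩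
      have := hge i hi (le_refl i)
      simp; omega
    · intro c hc
      unfold cands at hc
      obtain ⟨v, hvf, rfl⟩ := List.mem_map.mp hc
      obtain ⟨hvmem, hvq⟩ := List.mem_filter.mp hvf
      obtain ⟨j, hj, rfl⟩ := List.mem_iff_getElem.mp hvmem
      simp only [decide_eq_true_eq] at hvq
      have hij : i ≤ j := by
        by_contra hlt'
        have := hlt j hj (by omega)
        omega
      have hmono := PySem.List.sorted_id_getElem_mono l1 hij (hs ▸ hj)
      have h2 : s[i] ≤ s[j] := hmono
      omega
  · rw [if_neg hi]
    have hcnil : cands prev x s = [] := by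
      unfold cands
      rw [List.map_eq_nil_iff, List.filter_eq_nil_iff]
      intro v hv
      obtain ⟨j, hj, rfl⟩ := List.mem_iff_getElem.mp hv
      have := hlt j hj (by omega)
      simp; omega
    rw [hcnil]; rfl

theorem giaiInner_eq_altStep (l1 : List Int) (prev x : Int) :
    giaiInner l1 prev x = altStep (PySem.List.sorted l1 (fun y => y)) prev x := by
  rw [giaiInner_eq_foldl_min, altStep_eq_foldl_min]

theorem altStep_le (s : List Int) (prev x : Int) : altStep s prev x ≤ x := by
  unfold altStep
  simp only []
  split
  · exact min_le_left _ _
  · exact le_refl x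

theorem le_altStep (l1 : List Int) (prev x : Int) (h : prev ≤ x) :
    prev ≤ altStep (PySem.List.sorted l1 (fun y => y)) prev x := by
  rw [altStep_eq_foldl_min]
  unfold cands
  rcases PySem.List.foldl_min_mem ((l1.filter (fun v => decide (prev ≤ v - x))).map (fun v => v - x)) x with he | he
  · rw [he]; exact h
  · obtain ⟨v, hvf, hveq⟩ := List.mem_map.mp he
    obtain ⟨_, hvq⟩ := List.mem_filter.mp hvf
    simp only [decide_eq_true_eq] at hvq
    rw [← hveq]
    omega

theorem zip_all_iff_pairwise (xs : List Int) :
    ((xs.zip (xs.drop 1)).all (fun p => decide (p.1 ≤ p.2)) = true) ↔ List.Pairwise (· ≤ ·) xs := by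
  induction xs with
  | nil => simp
  | cons x t ih =>
    cases t with
    | nil => simp
    | cons y u =>
      simp only [List.drop_succ_cons, List.drop_zero, List.zip_cons_cons, List.all_cons,
        Bool.and_eq_true, decide_eq_true_eq] at *
      rw [List.pairwise_cons, List.pairwise_cons] at *
      constructor
      · rintro ⟨hxy, hrest⟩
        have h2 := ih.mp hrest
        refine ⟨?_, h2⟩
        intro a ha
        rcases List.mem_cons.mp ha with rfl | ha
        · exact hxy
        · exact le_trans hxy (h2.1 a ha)
      · rintro ⟨hx, hrest⟩
        exact ⟨hx y (by simp), ih.mpr hrest⟩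

theorem foldl_getLastD (s : List Int) (xs : List Int) : ∀ (acc : List Int), acc ≠ [] →
    xs.foldl (fun out x => out ++ [altStep s (out.getLastD 0) x]) acc
      = acc ++ runAlt s (acc.getLastD 0) xs := by
  induction xs with
  | nil => intro acc _; simp [runAlt]
  | cons x t ih =>
    intro acc h
    simp only [List.foldl_cons]
    rw [ih (acc ++ [altStep s (acc.getLastD 0) x]) (by simp)]
    simp [runAlt]

theorem sorted_eq_self_iff (xs : List Int) :
    PySem.List.sorted xs (fun y => y) = xs ↔ List.Pairwise (· ≤ ·) xs := by
  constructor
  · intro h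
    have := PySem.List.sorted_pairwise xs (fun y => y)
    rw [h] at this
    exact this
  · intro h
    exact PySem.List.eq_of_perm_of_pairwise_le_of_injective (fun y => y)
      (fun a b hab => hab) (PySem.List.sorted_perm xs (fun y => y) false)
      (PySem.List.sorted_pairwise xs (fun y => y)) h

theorem runAlt_pairwise (l1 : List Int) (xs : List Int) : ∀ (prev : Int),
    List.Pairwise (· ≤ ·) (prev :: xs) →
    List.Pairwise (· ≤ ·) (prev :: runAlt (PySem.List.sorted l1 (fun y => y)) prev xs) := by
  set s := PySem.List.sorted l1 (fun y => y) with hs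
  induction xs with
  | nil => intro prev _; simp [runAlt]
  | cons x t ih =>
    intro prev h
    rw [List.pairwise_cons] at h
    obtain ⟨hprev, hxt⟩ := h
    rw [List.pairwise_cons] at hxt
    obtain ⟨hxall, ht⟩ := hxt
    set y := altStep s prev x with hy
    have hyx : y ≤ x := altStep_le s prev x
    have hpy : prev ≤ y := le_altStep l1 prev x (hprev x (by simp))
    have hyt : List.Pairwise (· ≤ ·) (y :: t) := by
      rw [List.pairwise_cons]
      exact ⟨fun a ha => le_trans hyx (hxall a ha), ht⟩
    have hrec := ih y hyt
    simp only [runAlt]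
    rw [List.pairwise_cons]
    constructor
    · intro a ha
      rcases List.mem_cons.mp ha with rfl | ha
      · exact hpy
      · rw [List.pairwise_cons] at hrec
        exact le_trans hpy (hrec.1 a ha)
    · exact hrec

theorem giaiLoop_eq (l1 : List Int) (rest : List Int) : ∀ (done : List Int), done ≠ [] →
    ¬ List.Pairwise (· ≤ ·) (done ++ rest) →
    giaiLoop l1 (done ++ rest) done.length
      = if List.Pairwise (· ≤ ·)
            (done ++ runAlt (PySem.List.sorted l1 (fun y => y)) (done.getLastD 0) rest)
        then "YES" else "NO" := by
  induction rest with
  | nil =>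
    intro done hd hns
    rw [giaiLoop]
    rw [dif_neg (by simp)]
    have h0 : ¬ List.Pairwise (· ≤ ·) (done : List Int) := by simpa using hns
    rw [if_neg (by simp only [runAlt, List.append_nil]; exact h0)]
  | cons x t ih =>
    intro done hd hns
    rw [giaiLoop]
    rw [dif_pos (by simp)]
    have hprev : (done ++ x :: t).getD (done.length - 1) 0 = done.getLastD 0 := by
      rw [List.getD_append _ _ _ _ (by cases done with | nil => exact absurd rfl hd | cons a u => simp)]
      rw [List.getD_eq_getElem?_getD, List.getLastD_eq_getLast?, List.getLast?_eq_getElem?]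
    have hcur : (done ++ x :: t).getD done.length 0 = x := by
      rw [List.getD_eq_getElem?_getD, List.getElem?_append_right (le_refl _)]
      simp
    rw [hprev, hcur, giaiInner_eq_altStep]
    set s := PySem.List.sorted l1 (fun y => y) with hs
    set y := altStep s (done.getLastD 0) x with hy
    have hset : (done ++ x :: t).set done.length y = done ++ y :: t := by
      rw [List.set_append]; simp
    simp only [hset]
    have hrun : runAlt s (done.getLastD 0) (x :: t) = y :: runAlt s y t := rfl
    rw [hrun]
    by_cases hP : List.Pairwise (· ≤ ·) (done ++ y :: t)
    · rw [if_pos ((sorted_eq_self_iff _).mpr hP)]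
      rw [if_pos ?_]
      rw [List.pairwise_append] at hP ⊢
      obtain ⟨hpd, hpyt, hglue⟩ := hP
      have hrec := runAlt_pairwise l1 t y hpyt
      refine ⟨hpd, hrec, ?_⟩
      intro a ha b hb
      rcases List.mem_cons.mp hb with rfl | hb
      · exact hglue a ha y (by simp)
      · rw [List.pairwise_cons] at hrec
        exact le_trans (hglue a ha y (by simp)) (hrec.1 b hb)
    · rw [if_neg (fun heq => hP ((sorted_eq_self_iff _).mp heq))]
      have h2 := ih (done ++ [y]) (by simp) (by simpa using hP)
      simp only [List.length_append, List.getLastD_concat, List.append_assoc,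
        List.singleton_append, List.length_cons, List.length_nil] at h2
      exact h2

theorem min_head_sorted (l1 : List Int) (h : l1 ≠ []) :
    (PySem.List.min? l1 (fun y => y)).getD 0 = (PySem.List.sorted l1 (fun y => y)).getD 0 0 := by
  set s := PySem.List.sorted l1 (fun y => y) with hs
  have hmem : ∀ a : Int, a ∈ s ↔ a ∈ l1 := fun a =>
    (PySem.List.sorted_perm l1 (fun y => y) false).mem_iff
  have hsnil : s ≠ [] := by
    intro hn
    exact h ((PySem.List.sorted_eq_nil_iff l1 (fun y => y) false).mp hn)
  have hslen : 0 < s.length := List.length_pos_iff.mpr hsnil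
  obtain ⟨w, hw⟩ : ∃ w, PySem.List.min? l1 (fun y => y) = some w := by
    cases hmo : PySem.List.min? l1 (fun y => y) with
    | none => exact absurd ((PySem.List.min?_eq_none_iff l1 (fun y => y)).mp hmo) h
    | some w => exact ⟨w, rfl⟩
  rw [hw]
  have h1 : w ≤ s[0] := PySem.List.min?_isMin hw s[0] ((hmem _).mp (List.getElem_mem hslen))
  have h2 : s[0] ≤ w := by
    obtain ⟨j, hj, hje⟩ := List.mem_iff_getElem.mp ((hmem w).mpr (PySem.List.min?_mem hw))
    have := PySem.List.sorted_id_getElem_mono l1 (Nat.zero_le j) (hs ▸ hj)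
    have h3 : s[0] ≤ s[j] := this
    omega
  have : s.getD 0 0 = s[0] := List.getD_eq_getElem s 0 hslen
  rw [this]
  simp only [Option.getD_some]
  omega

-- ===== VERDICT (by name: the statement is the Claim_ definition above) =====
theorem giai_spec : Claim_equal_giai := by
  intro n l m l1 _ hpre
  obtain ⟨hl, hl1⟩ := hpre
  unfold Spec_giai
  obtain ⟨h0, tl⟩ : ∃ h0 tl, l = h0 :: tl := by
    cases l with
    | nil => exact absurd rfl hl
    | cons a t => exact ⟨a, t, rfl⟩
  obtain ⟨tl, rfl⟩ := tl
  unfold giai giai_alt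
  set s := PySem.List.sorted l1 (fun y => y) with hs
  simp only [List.getD_cons_zero, List.drop_succ_cons, List.drop_zero, List.set_cons_zero]
  rw [min_head_sorted l1 hl1]
  set a0 := min (s.getD 0 0 - h0) h0 with ha0
  rw [foldl_getLastD s tl [a0] (by simp)]
  simp only [show ([a0] : List Int).getLastD 0 = a0 from rfl, List.singleton_append]
  by_cases hP : List.Pairwise (· ≤ ·) (a0 :: tl)
  · rw [if_pos ((sorted_eq_self_iff _).mpr hP)]
    have hrp := runAlt_pairwise l1 tl a0 hP
    rw [if_pos ((zip_all_iff_pairwise _).mpr hrp)]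
  · rw [if_neg (fun heq => hP ((sorted_eq_self_iff _).mp heq))]
    have h1 := giaiLoop_eq l1 tl [a0] (by simp) (by simpa using hP)
    simp only [List.singleton_append, List.length_cons, List.length_nil,
      show ([a0] : List Int).getLastD 0 = a0 from rfl] at h1
    rw [h1]
    by_cases hQ : List.Pairwise (· ≤ ·) (a0 :: runAlt s a0 tl)
    · rw [if_pos hQ, if_pos ((zip_all_iff_pairwise _).mpr hQ)]
    · rw [if_neg hQ, if_neg (fun hb => hQ ((zip_all_iff_pairwise _).mp hb))]
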